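-- pv_equiv track=rewrite | github.com/ajmaq0/Clearinghouse | backend/app/netting.py | _johnson_cycles
-- ===== SOURCE A (Python) =====
-- from collections import defaultdict
-- from typing import Dict, List, Tuple
--
-- def _johnson_cycles(adj: Dict[str, Dict[str, int]]) -> List[List[str]]:
--     """
--     Find all simple (elementary) cycles in a directed weighted graph.
--
--     adj: {node: {neighbor: weight, ...}, ...}  — only positive-weight edges.
--     Returns a list of cycles; each cycle is an ordered list of node IDs
--     representing the path (the first node is implicitly repeated at the end).
--
--     Johnson, D. B. (1975). Finding all the elementary circuits of a directed
--     graph. SIAM Journal on Computing, 4(1), 77-84.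
--     """
--     all_nodes: List[str] = sorted(
--         set(adj.keys()) | {v for nbrs in adj.values() for v in nbrs}
--     )
--     idx: Dict[str, int] = {n: i for i, n in enumerate(all_nodes)}
--
--     blocked: set = set()
--     B: Dict[str, set] = defaultdict(set)
--     stack: List[str] = []
--     cycles: List[List[str]] = []
--
--     def _unblock(u: str) -> None:
--         blocked.discard(u)
--         for w in list(B[u]):
--             B[u].discard(w)
--             if w in blocked:
--                 _unblock(w)
--
--     def _circuit(v: str, start: str, s_idx: int) -> bool:
--         found = False
--         stack.append(v)
--         blocked.add(v)
--         for w in adj.get(v, {}):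
--             if idx.get(w, -1) < s_idx:
--                 continue  # restrict to subgraph with index >= s_idx
--             if w == start:
--                 cycles.append(list(stack))
--                 found = True
--             elif w not in blocked:
--                 if _circuit(w, start, s_idx):
--                     found = True
--         if found:
--             _unblock(v)
--         else:
--             for w in adj.get(v, {}):
--                 if idx.get(w, -1) >= s_idx:
--                     B[w].add(v)
--         stack.pop()
--         return found
--
--     for i, s in enumerate(all_nodes):
--         blocked.clear()
--         B.clear()
--         _circuit(s, s, i)
--
--     return cycles
-- ===== SOURCE B (Python) =====
-- from collections import defaultdict
--
-- def _johnson_cycles(adj):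
--     all_nodes = sorted(set(adj.keys()) | {v for nbrs in adj.values() for v in nbrs})
--     idx = {n: i for i, n in enumerate(all_nodes)}
--     cycles = []
--     for s_idx, start in enumerate(all_nodes):
--         blocked = set()
--         B = defaultdict(set)
--         stack = []
--
--         def _unblock(u):
--             blocked.discard(u)
--             for w in list(B[u]):
--                 B[u].discard(w)
--                 if w in blocked:
--                     _unblock(w)
--
--         stack.append(start)
--         blocked.add(start)
--         frames = [[start, list(adj.get(start, {})), False]]
--         while frames:
--             fr = frames[-1]
--             if fr[1]:
--                 w = fr[1].pop(0)
--                 if idx.get(w, -1) < s_idx: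
--                     continue
--                 if w == start:
--                     cycles.append(list(stack))
--                     fr[2] = True
--                 elif w not in blocked:
--                     stack.append(w)
--                     blocked.add(w)
--                     frames.append([w, list(adj.get(w, {})), False])
--             else:
--                 v, found = fr[0], fr[2]
--                 if found:
--                     _unblock(v)
--                 else:
--                     for w in adj.get(v, {}):
--                         if idx.get(w, -1) >= s_idx:
--                             B[w].add(v)
--                 stack.pop()
--                 frames.pop()
--                 if frames and found:
--                     frames[-1][2] = True
--     return cycles
-- ===== Notes on version B (the rewrite author's own statement) =====
-- stated objective: alternative
-- what changed: The recursive _circuit closure is replaced by an iterative engine: an explicit stack of [node, remaining-neighbours, found] frames drives the search, with found-propagation and the B-list/unblock bookkeeping done at frame exit instead of via nested function returns.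
import Mathlib
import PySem

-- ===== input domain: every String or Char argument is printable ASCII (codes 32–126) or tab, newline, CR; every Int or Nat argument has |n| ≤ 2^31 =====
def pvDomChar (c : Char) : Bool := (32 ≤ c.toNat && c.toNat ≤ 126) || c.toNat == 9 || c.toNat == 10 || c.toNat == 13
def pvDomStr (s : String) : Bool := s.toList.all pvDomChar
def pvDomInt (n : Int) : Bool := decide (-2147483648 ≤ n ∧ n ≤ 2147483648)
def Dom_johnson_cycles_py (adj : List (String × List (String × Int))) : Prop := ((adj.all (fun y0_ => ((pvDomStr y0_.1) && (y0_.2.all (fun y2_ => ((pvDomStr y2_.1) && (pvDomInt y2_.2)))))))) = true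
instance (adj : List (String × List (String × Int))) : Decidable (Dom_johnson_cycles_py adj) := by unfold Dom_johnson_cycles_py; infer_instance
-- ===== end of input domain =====

-- B replaces A's recursive _circuit closure by an iterative explicit-frame engine (same Johnson
-- blocking bookkeeping, different control structure); same return value, no speed claim.
-- Python iterates set B[u] in hash order inside _unblock; the ports iterate it in first-insertion
-- order — the returned cycle list does not depend on that order (blocked/B are never printed).

-- ===== PORT A =====
-- search state shared by both ports: blocked set, B-map, path stack, output cycles
structure JS where
  blocked : PySem.Set String
  bm : PySem.Dict String (PySem.Set String)
  stk : List String
  cyc : List (List String)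

-- the Python dicts, as PySem dicts (insertion order, later duplicate keys overwrite in place)
def normAdj (adj : List (String × List (String × Int))) : PySem.Dict String (PySem.Dict String Int) :=
  adj.foldl (fun d p => d.insert p.1 (p.2.foldl (fun e q => e.insert q.1 q.2) PySem.Dict.empty)) PySem.Dict.empty

-- sorted(set(adj.keys()) | {v for nbrs in adj.values() for v in nbrs})
def allNodesOf (nadj : PySem.Dict String (PySem.Dict String Int)) : List String :=
  PySem.List.sorted
    (PySem.Set.union (PySem.Set.ofList nadj.keys) (nadj.values.flatMap PySem.Dict.keys))
    (fun x => x) false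

-- {n: i for i, n in enumerate(all_nodes)}
def idxOf (nodes : List String) : PySem.Dict String Int :=
  (PySem.List.enumerate nodes 0).foldl (fun d p => d.insert p.2 p.1) PySem.Dict.empty

-- _unblock, shared verbatim by both Pythons (fuel: each nested call consumes a B-entry first,
-- so total-B-size + 1 depth always suffices; the guard is a totality artifact only)
mutual
def unblock : Nat → String → (PySem.Set String × PySem.Dict String (PySem.Set String)) →
    (PySem.Set String × PySem.Dict String (PySem.Set String))
  | 0, _, s => s
  | g+1, u, (bl, bm) => unblockGo g u (bm.getD u []) (PySem.Set.discard bl u, bm)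
termination_by g _ _ => (g, 0)

def unblockGo : Nat → String → List String →
    (PySem.Set String × PySem.Dict String (PySem.Set String)) →
    (PySem.Set String × PySem.Dict String (PySem.Set String))
  | _, _, [], s => s
  | g, u, w :: ws, (bl, bm) =>
    let bm := bm.insert u (PySem.Set.discard (bm.getD u []) w)
    unblockGo g u ws (if PySem.Set.contains bl w then unblock g w (bl, bm) else (bl, bm))
termination_by g _ ws _ => (g, ws.length + 1)
end

def totalB (bm : PySem.Dict String (PySem.Set String)) : Nat := (bm.values.map List.length).sum

-- the two exit actions of a vertex (the tail of _circuit / the frame-exit branch of B)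
def addBs (nadj : PySem.Dict String (PySem.Dict String Int)) (idx : PySem.Dict String Int)
    (sIdx : Int) (v : String) (bm : PySem.Dict String (PySem.Set String)) :
    PySem.Dict String (PySem.Set String) :=
  ((nadj.getD v PySem.Dict.empty).keys).foldl
    (fun bm w => if sIdx ≤ idx.getD w (-1) then bm.insert w (PySem.Set.add (bm.getD w []) v) else bm)
    bm

def exitF (nadj : PySem.Dict String (PySem.Dict String Int)) (idx : PySem.Dict String Int)
    (sIdx : Int) (v : String) (found : Bool) (st : JS) : JS :=
  if found then
    let p := unblock (totalB st.bm + 1) v (st.blocked, st.bm)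
    { blocked := p.1, bm := p.2, stk := st.stk.dropLast, cyc := st.cyc }
  else
    { blocked := st.blocked, bm := addBs nadj idx sIdx v st.bm, stk := st.stk.dropLast, cyc := st.cyc }

-- _circuit: recursive DFS with fuel = recursion depth bound (node count + 2 always suffices;
-- totality artifact only)
mutual
def circuitA (nadj : PySem.Dict String (PySem.Dict String Int)) (idx : PySem.Dict String Int)
    (start : String) (sIdx : Int) : Nat → String → JS → Bool × JS
  | 0, _, st => (false, st)
  | g+1, v, st =>
    let r := circLoopA nadj idx start sIdx g ((nadj.getD v PySem.Dict.empty).keys) false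
      { st with stk := st.stk ++ [v], blocked := PySem.Set.add st.blocked v }
    (r.1, exitF nadj idx sIdx v r.1 r.2)
termination_by g _ _ => (g, 0)

def circLoopA (nadj : PySem.Dict String (PySem.Dict String Int)) (idx : PySem.Dict String Int)
    (start : String) (sIdx : Int) : Nat → List String → Bool → JS → Bool × JS
  | _, [], found, st => (found, st)
  | g, w :: ws, found, st =>
    if idx.getD w (-1) < sIdx then circLoopA nadj idx start sIdx g ws found st
    else if w == start then
      circLoopA nadj idx start sIdx g ws true { st with cyc := st.cyc ++ [st.stk] }
    else if PySem.Set.contains st.blocked w then circLoopA nadj idx start sIdx g ws found st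
    else
      let r := circuitA nadj idx start sIdx g w st
      circLoopA nadj idx start sIdx g ws (found || r.1) r.2
termination_by g ws _ _ => (g, ws.length + 1)
end

def johnson_cycles_py (adj : List (String × List (String × Int))) : List (List String) :=
  let nadj := normAdj adj
  let nodes := allNodesOf nadj
  let idx := idxOf nodes
  ((PySem.List.enumerate nodes 0).foldl
    (fun (st : JS) p =>
      (circuitA nadj idx p.2 p.1 (nodes.length + 2) p.2
        { blocked := [], bm := PySem.Dict.empty, stk := st.stk, cyc := st.cyc }).2)
    ⟨[], PySem.Dict.empty, [], []⟩).cyc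

-- ===== PORT B =====
-- a frame of B's explicit stack: vertex, remaining neighbours, found flag
-- (fuel = remaining recursion budget for children, a totality artifact only)
structure Fr where
  v : String
  ns : List String
  found : Bool
  fuel : Nat

def edgeB (nadj : PySem.Dict String (PySem.Dict String Int)) : Nat :=
  (nadj.values.map (fun d => d.items.length)).sum + 2

def frW (M : Nat) (f : Fr) : Nat := M ^ (f.fuel + 1) * (f.ns.length + 1)
def measM (M : Nat) (frs : List Fr) : Nat := (frs.map (frW M)).sum + frs.length

theorem keysLen_le (nadj : PySem.Dict String (PySem.Dict String Int)) (w : String) :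
    ((nadj.getD w PySem.Dict.empty).keys).length + 2 ≤ edgeB nadj := by
  unfold edgeB
  simp only [PySem.Dict.keys, List.length_map]
  rcases h : PySem.Dict.get? nadj w with _ | d
  · simp [PySem.Dict.getD_eq_get?_getD, h, PySem.Dict.empty]
  · rw [PySem.Dict.getD_eq_get?_getD, h]
    simp only [Option.getD_some]
    have hm : (w, d) ∈ nadj.items := PySem.Dict.mem_items_of_get?_eq_some _ h
    have hv : d.items.length ∈ nadj.values.map (fun e => e.items.length) := by
      simp only [PySem.Dict.values, List.map_map]
      exact List.mem_map_of_mem hm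
    have := List.le_sum_of_mem hv
    omega

theorem measM_lt_skip (M : Nat) (_hM : 1 ≤ M) (v : String) (w : String) (ws : List String)
    (f1 f2 : Bool) (g : Nat) (K : List Fr) :
    measM M (⟨v, ws, f2, g⟩ :: K) < measM M (⟨v, w :: ws, f1, g⟩ :: K) := by
  unfold measM frW
  simp only [List.map_cons, List.sum_cons]
  have h : 0 < M ^ (g + 1) := Nat.pow_pos (by omega)
  have h2 : M ^ (g + 1) * (ws.length + 1) < M ^ (g + 1) * (ws.length + 1 + 1) :=
    mul_lt_mul_of_pos_left (by omega) h
  simp only [List.length_cons]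
  omega

theorem measM_lt_push (M : Nat) (_hM : 2 ≤ M) (v w : String) (cs ws : List String)
    (hcs : cs.length + 2 ≤ M) (f0 f1 : Bool) (g : Nat) (K : List Fr) :
    measM M (⟨w, cs, false, g⟩ :: ⟨v, ws, f1, g+1⟩ :: K) <
      measM M (⟨v, w :: ws, f0, g+1⟩ :: K) := by
  unfold measM frW
  simp only [List.map_cons, List.sum_cons, List.length_cons]
  have e : M ^ (g + 1 + 1) = M ^ (g + 1) * M := pow_succ M (g + 1)
  have h1 : M ≤ M ^ (g + 1) := Nat.le_self_pow (by omega) M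
  have h2 : M ^ (g + 1) * (cs.length + 2) ≤ M ^ (g + 1) * M := Nat.mul_le_mul_left _ hcs
  have h3 : M ^ (g + 1) * (cs.length + 1) + M ^ (g + 1) = M ^ (g + 1) * (cs.length + 2) := by ring
  have h4 : M ^ (g + 1 + 1) * (ws.length + 1 + 1) = M ^ (g + 1 + 1) * (ws.length + 1) + M ^ (g + 1 + 1) := by ring
  omega

theorem measM_lt_pop (M : Nat) (v : String) (f : Bool) (g : Nat) (pv : String)
    (pns : List String) (pf pf' : Bool) (pg : Nat) (K : List Fr) :
    measM M (⟨pv, pns, pf', pg⟩ :: K) < measM M (⟨v, [], f, g⟩ :: ⟨pv, pns, pf, pg⟩ :: K) := by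
  unfold measM frW
  simp only [List.map_cons, List.sum_cons, List.length_cons]
  omega

-- B's engine: while frames: look at the top frame, consume one neighbour or exit the frame
def runM (nadj : PySem.Dict String (PySem.Dict String Int)) (idx : PySem.Dict String Int)
    (start : String) (sIdx : Int) : List Fr → JS → JS
  | [], st => st
  | ⟨v, [], found, _⟩ :: [], st => exitF nadj idx sIdx v found st
  | ⟨v, [], found, _⟩ :: ⟨pv, pns, pf, pg⟩ :: K, st =>
    runM nadj idx start sIdx (⟨pv, pns, pf || found, pg⟩ :: K) (exitF nadj idx sIdx v found st)
  | ⟨v, w :: ws, found, g⟩ :: K, st =>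
    if idx.getD w (-1) < sIdx then runM nadj idx start sIdx (⟨v, ws, found, g⟩ :: K) st
    else if w == start then
      runM nadj idx start sIdx (⟨v, ws, true, g⟩ :: K) { st with cyc := st.cyc ++ [st.stk] }
    else if PySem.Set.contains st.blocked w then
      runM nadj idx start sIdx (⟨v, ws, found, g⟩ :: K) st
    else
      match g with
      | 0 => runM nadj idx start sIdx (⟨v, ws, found, 0⟩ :: K) st
      | g'+1 =>
        runM nadj idx start sIdx
          (⟨w, (nadj.getD w PySem.Dict.empty).keys, false, g'⟩ :: ⟨v, ws, found, g'+1⟩ :: K)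
          { st with stk := st.stk ++ [w], blocked := PySem.Set.add st.blocked w }
termination_by frs _ => measM (edgeB nadj) frs
decreasing_by
  all_goals first
    | exact measM_lt_pop _ _ _ _ _ _ _ _ _ _
    | exact measM_lt_push _ (by unfold edgeB; omega) _ _ _ _ (keysLen_le nadj w) _ _ _ _
    | exact measM_lt_skip _ (by unfold edgeB; omega) _ _ _ _ _ _ _

def johnson_cycles_py_alt (adj : List (String × List (String × Int))) : List (List String) :=
  let nadj := normAdj adj
  let nodes := allNodesOf nadj
  let idx := idxOf nodes
  ((PySem.List.enumerate nodes 0).foldl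
    (fun (st : JS) p =>
      runM nadj idx p.2 p.1
        [⟨p.2, (nadj.getD p.2 PySem.Dict.empty).keys, false, nodes.length + 1⟩]
        { blocked := PySem.Set.add [] p.2, bm := PySem.Dict.empty, stk := st.stk ++ [p.2],
          cyc := st.cyc })
    ⟨[], PySem.Dict.empty, [], []⟩).cyc

-- ===== PRECONDITION & SPEC =====
def Spec_johnson_cycles_py (adj : List (String × List (String × Int))) (out : List (List String)) : Prop := out = johnson_cycles_py_alt adj
instance (adj : List (String × List (String × Int))) (out : List (List String)) : Decidable (Spec_johnson_cycles_py adj out) := by unfold Spec_johnson_cycles_py; infer_instance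

-- ===== CLAIM (what is proved, stated in full; the proofs are below) =====
def Claim_equal_johnson_cycles_py : Prop := ∀ (adj : List (String × List (String × Int))), Dom_johnson_cycles_py adj → Spec_johnson_cycles_py adj (johnson_cycles_py adj)

-- ===== LEMMAS AND PROOFS =====

-- what the machine does after the top frame for v finishes with result r
def resume (nadj : PySem.Dict String (PySem.Dict String Int)) (idx : PySem.Dict String Int)
    (start : String) (sIdx : Int) (v : String) (K : List Fr) (r : Bool × JS) : JS :=
  let st2 := exitF nadj idx sIdx v r.1 r.2
  match K with
  | [] => st2
  | ⟨pv, pns, pf, pg⟩ :: K' => runM nadj idx start sIdx (⟨pv, pns, pf || r.1, pg⟩ :: K') st2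

-- the machine run of one frame is the recursive neighbour loop followed by the frame exit
theorem runM_eq_loop (nadj : PySem.Dict String (PySem.Dict String Int))
    (idx : PySem.Dict String Int) (start : String) (sIdx : Int) :
    ∀ (g : Nat) (ns : List String) (v : String) (found : Bool) (st : JS) (K : List Fr),
      runM nadj idx start sIdx (⟨v, ns, found, g⟩ :: K) st
        = resume nadj idx start sIdx v K (circLoopA nadj idx start sIdx g ns found st) := by

  intro g
  induction g using Nat.strong_induction_on with
  | _ g IHg =>
    intro ns
    induction ns with
    | nil =>
      intro v found st K
      cases K with
      | nil => rw [circLoopA.eq_1, runM.eq_2, resume]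
      | cons p K' =>
        obtain ⟨pv, pns, pf, pg⟩ := p
        rw [circLoopA.eq_1, runM.eq_3, resume]
    | cons w ws IHns =>
      intro v found st K
      rw [circLoopA.eq_2]
      cases g with
      | zero =>
        rw [runM.eq_4]
        by_cases h1 : idx.getD w (-1) < sIdx
        · rw [if_pos h1, if_pos h1, IHns]
        · rw [if_neg h1, if_neg h1]
          by_cases h2 : (w == start) = true
          · rw [if_pos h2, if_pos h2, IHns]
          · rw [if_neg h2, if_neg h2]
            by_cases h3 : PySem.Set.contains st.blocked w = true
            · rw [if_pos h3, if_pos h3, IHns]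
            · rw [if_neg h3, if_neg h3, circuitA]
              simp only [Bool.or_false]
              exact IHns v found st K
      | succ g' =>
        rw [runM.eq_5]
        by_cases h1 : idx.getD w (-1) < sIdx
        · rw [if_pos h1, if_pos h1, IHns]
        · rw [if_neg h1, if_neg h1]
          by_cases h2 : (w == start) = true
          · rw [if_pos h2, if_pos h2, IHns]
          · rw [if_neg h2, if_neg h2]
            by_cases h3 : PySem.Set.contains st.blocked w = true
            · rw [if_pos h3, if_pos h3, IHns]
            · rw [if_neg h3, if_neg h3]
              rw [IHg g' (by omega)]
              simp only [resume, circuitA]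
              rw [IHns]
              simp only [resume]

theorem perStart_eq (nadj : PySem.Dict String (PySem.Dict String Int))
    (idx : PySem.Dict String Int) (s : String) (sIdx : Int) (n : Nat) (st : JS) :
    (circuitA nadj idx s sIdx (n + 2) s
        { blocked := [], bm := PySem.Dict.empty, stk := st.stk, cyc := st.cyc }).2
      = runM nadj idx s sIdx
          [⟨s, (nadj.getD s PySem.Dict.empty).keys, false, n + 1⟩]
          { blocked := PySem.Set.add [] s, bm := PySem.Dict.empty, stk := st.stk ++ [s],
            cyc := st.cyc } := by
  rw [runM_eq_loop, circuitA.eq_2]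
  rfl

-- ===== VERDICT (by name: the statement is the Claim_ definition above) =====
theorem johnson_cycles_py_spec : Claim_equal_johnson_cycles_py := by
  intro adj _
  unfold Spec_johnson_cycles_py
  unfold johnson_cycles_py johnson_cycles_py_alt
  have hf : (fun (st : JS) (p : Int × String) =>
      (circuitA (normAdj adj) (idxOf (allNodesOf (normAdj adj))) p.2 p.1
        ((allNodesOf (normAdj adj)).length + 2) p.2
        { blocked := [], bm := PySem.Dict.empty, stk := st.stk, cyc := st.cyc }).2)
    = (fun (st : JS) (p : Int × String) =>
      runM (normAdj adj) (idxOf (allNodesOf (normAdj adj))) p.2 p.1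
        [⟨p.2, ((normAdj adj).getD p.2 PySem.Dict.empty).keys, false,
          (allNodesOf (normAdj adj)).length + 1⟩]
        { blocked := PySem.Set.add [] p.2, bm := PySem.Dict.empty, stk := st.stk ++ [p.2],
          cyc := st.cyc }) := by
    funext st p
    exact perStart_eq _ _ _ _ _ _
  simp only []
  rw [hf]
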